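-- pv_equiv track=rewrite | github.com/amasiukevich/ALHE | src/algorithms/base_algorithm.py | remove_cycles
-- ===== SOURCE A (Python) =====
-- def remove_cycles(state: list):
--
--     new_state = []
--     outter_count = 0
--     while outter_count < len(state):
--         found = False
--
--         inner_count = outter_count + 1
--         while inner_count < len(state):
--
--             if state[outter_count] == state[inner_count]:
--                 found = True
--                 new_state.append(state[inner_count])
--                 outter_count = inner_count
--                 break
--
--             inner_count += 1
--
--         if not found:
--             new_state.append(state[outter_count])
--
--         outter_count += 1
--
--     return new_state
-- ===== SOURCE B (Python) =====
-- def remove_cycles(state: list):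
--     # O(n): precompute, per position, the next index with the same value
--     # (one backward pass with a dict), then do a single linear walk.
--     n = len(state)
--     nxt = [None] * n
--     last = {}
--     for i in range(n - 1, -1, -1):
--         nxt[i] = last.get(state[i])
--         last[state[i]] = i
--     out = []
--     i = 0
--     while i < n:
--         out.append(state[i])
--         j = nxt[i]
--         i = (j + 1) if j is not None else (i + 1)
--     return out
-- ===== Notes on version B (the rewrite author's own statement) =====
-- stated objective: faster
-- what changed: Replaced the quadratic inner scan for the next equal element by a backward dict pass precomputing next-same-value indices, followed by one linear walk.
import Mathlib
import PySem

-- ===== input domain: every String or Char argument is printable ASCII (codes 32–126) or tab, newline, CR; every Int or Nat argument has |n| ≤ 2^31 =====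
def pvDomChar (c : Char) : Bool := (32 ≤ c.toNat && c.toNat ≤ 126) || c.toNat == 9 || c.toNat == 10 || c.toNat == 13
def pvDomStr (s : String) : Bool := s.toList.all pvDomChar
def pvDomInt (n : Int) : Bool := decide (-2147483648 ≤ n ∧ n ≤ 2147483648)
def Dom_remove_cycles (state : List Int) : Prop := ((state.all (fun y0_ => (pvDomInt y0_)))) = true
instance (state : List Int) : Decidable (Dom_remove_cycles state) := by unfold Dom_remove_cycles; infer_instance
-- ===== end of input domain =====

-- B replaces A's quadratic inner scan by a backward dict pass precomputing next-same-value
-- indices plus one linear walk (objective: faster, asymptotic).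

-- ===== PORT A =====
-- inner while loop of A: first j ≥ start (j > outter_count) with state[j] == state[i], else none
def innerA (state : List Int) (i j : Nat) : Option Nat :=
  if j < state.length then
    if state.getD i 0 = state.getD j 0 then some j
    else innerA state i (j + 1)
  else none
termination_by state.length - j

-- the some-result of the inner loop is in range and past its start (termination fact for the outer loop)
theorem innerA_some_bounds (state : List Int) (i j0 j : Nat)
    (h : innerA state i j0 = some j) : j0 ≤ j ∧ j < state.length := by
  fun_induction innerA state i j0 with
  | case1 j0 hlt heq => simp_all
  | case2 j0 hlt hne ih => have := ih h; omega
  | case3 j0 hge => simp_all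

-- outer while loop of A, accumulating new_state
def outerA (state : List Int) (i : Nat) (acc : List Int) : List Int :=
  if i < state.length then
    match hj : innerA state i (i + 1) with
    | some j => outerA state (j + 1) (acc ++ [state.getD j 0])
    | none => outerA state (i + 1) (acc ++ [state.getD i 0])
  else acc
termination_by state.length - i
decreasing_by
  · have := innerA_some_bounds state i (i + 1) j hj; omega
  · omega

def remove_cycles (state : List Int) : List Int := outerA state 0 []

-- ===== PORT B =====
-- backward dict pass of Source B: bnxtB state k last = nxt[0..k), `last` holding the indices ≥ k seen so far
def bnxtB (state : List Int) : Nat → PySem.Dict Int Nat → List (Option Nat)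
  | 0, _ => []
  | k + 1, last =>
    bnxtB state k (last.insert (state.getD k 0) k) ++ [last.get? (state.getD k 0)]

-- linear walk of Source B; fuel = state.length is a totality guard only (i advances by ≥ 1 per step)
def walkB (state : List Int) (nxt : List (Option Nat)) : Nat → Nat → List Int → List Int
  | 0, _, acc => acc
  | fuel + 1, i, acc =>
    if i < state.length then
      match nxt.getD i none with
      | some j => walkB state nxt fuel (j + 1) (acc ++ [state.getD i 0])
      | none => walkB state nxt fuel (i + 1) (acc ++ [state.getD i 0])
    else acc

def remove_cycles_alt (state : List Int) : List Int :=
  walkB state (bnxtB state state.length PySem.Dict.empty) state.length 0 []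

-- ===== PRECONDITION & SPEC =====
def Spec_remove_cycles (state : List Int) (out : List Int) : Prop := out = remove_cycles_alt state
instance (state : List Int) (out : List Int) : Decidable (Spec_remove_cycles state out) := by unfold Spec_remove_cycles; infer_instance

-- ===== CLAIM (what is proved, stated in full; the proofs are below) =====
def Claim_equal_remove_cycles : Prop := ∀ (state : List Int), Dom_remove_cycles state → Spec_remove_cycles state (remove_cycles state)

-- ===== LEMMAS AND PROOFS =====

theorem bnxtB_length (state : List Int) (k : Nat) (last : PySem.Dict Int Nat) :
    (bnxtB state k last).length = k := by
  induction k generalizing last with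
  | zero => rfl
  | succ k ih => simp [bnxtB, ih]

-- minFrom: first j ≥ k with state[j] = v (the content of `last` after the backward pass reaches k)
def minFrom (state : List Int) (v : Int) (k : Nat) : Option Nat :=
  if k < state.length then
    if state.getD k 0 = v then some k else minFrom state v (k + 1)
  else none
termination_by state.length - k

theorem innerA_eq_minFrom (state : List Int) (i j : Nat) :
    innerA state i j = minFrom state (state.getD i 0) j := by
  fun_induction innerA state i j with
  | case1 j hlt heq => rw [minFrom, if_pos hlt, if_pos heq.symm]
  | case2 j hlt hne ih => rw [minFrom, if_pos hlt, if_neg (fun h => hne h.symm)]; exact ih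
  | case3 j hge => rw [minFrom, if_neg hge]

-- invariant of the backward pass: entry i of nxt is the first j > i with the same value
theorem bnxtB_spec (state : List Int) (k : Nat) (hk : k ≤ state.length)
    (last : PySem.Dict Int Nat)
    (hinv : ∀ v, last.get? v = minFrom state v k) (i : Nat) (hik : i < k) :
    (bnxtB state k last).getD i none = minFrom state (state.getD i 0) (i + 1) := by
  induction k generalizing last with
  | zero => omega
  | succ k ih =>
    rw [bnxtB]
    rcases Nat.lt_or_ge i k with hlt | hge
    · rw [List.getD_eq_getElem?_getD, List.getElem?_append_left (by rw [bnxtB_length]; exact hlt),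
        ← List.getD_eq_getElem?_getD]
      apply ih (by omega)
      · intro v
        have hk' : k < state.length := by omega
        rw [PySem.Dict.get?_insert, minFrom, if_pos hk']
        by_cases hv : v = state.getD k 0
        · simp [hv]
        · rw [if_neg hv, if_neg (fun h => hv h.symm), hinv v]
      · exact hlt
    · have hik' : i = k := by omega
      subst hik'
      rw [List.getD_eq_getElem?_getD, List.getElem?_append_right (by rw [bnxtB_length])]
      simp [bnxtB_length, hinv]

theorem walkB_eq_outerA (state : List Int) (nxt : List (Option Nat))
    (hnxt : ∀ i, i < state.length → nxt.getD i none = innerA state i (i + 1)) :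
    ∀ fuel i acc, state.length ≤ fuel + i →
      walkB state nxt fuel i acc = outerA state i acc := by
  intro fuel
  induction fuel with
  | zero =>
    intro i acc hle
    rw [walkB, outerA]
    simp [show ¬ i < state.length by omega]
  | succ fuel ih =>
    intro i acc hle
    rw [walkB, outerA]
    by_cases hi : i < state.length
    · simp only [hi, if_pos]
      rw [hnxt i hi]
      cases hj : innerA state i (i + 1) with
      | some j =>
        obtain ⟨hj1, hj2⟩ := innerA_some_bounds state i (i + 1) j hj
        have hval : state.getD i 0 = state.getD j 0 := by
          have := innerA_eq_minFrom state i (i + 1)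
          rw [hj] at this
          -- extract value equality from minFrom
          clear hj
          have : minFrom state (state.getD i 0) (i+1) = some j := this.symm
          -- prove: minFrom state v k = some j → state.getD j 0 = v
          have hmf : ∀ k, minFrom state (state.getD i 0) k = some j → state.getD j 0 = state.getD i 0 := by
            intro k
            fun_induction minFrom state (state.getD i 0) k with
            | case1 k hlt heq => intro h; simp at h; subst h; exact heq
            | case2 k hlt hne ihm => exact ihm
            | case3 k hge => simp
          exact (hmf (i+1) this).symm
        rw [hval]
        exact ih (j + 1) (acc ++ [state.getD j 0]) (by omega)
      | none =>
        exact ih (i + 1) (acc ++ [state.getD i 0]) (by omega)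
    · simp [hi]

-- ===== VERDICT (by name: the statement is the Claim_ definition above) =====
theorem remove_cycles_spec : Claim_equal_remove_cycles := by
  intro state _
  unfold Spec_remove_cycles remove_cycles remove_cycles_alt
  symm
  apply walkB_eq_outerA
  · intro i hi
    rw [bnxtB_spec state state.length le_rfl PySem.Dict.empty ?_ i hi, innerA_eq_minFrom]
    intro v
    rw [PySem.Dict.get?_empty, minFrom]
    simp
  · omega
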